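-- pv_equiv track=rewrite | github.com/xbmc/sync_addon_metadata_translations | addonxml_po_sync.py | get_xml_insert_index
-- ===== SOURCE A (Python) =====
-- def get_xml_insert_index(addon_xml):
--     insert_line = -1
--
--     for index, line in enumerate(addon_xml['content_lines']):
--         if '<extension point="xbmc.addon.metadata">' in line:
--             insert_line = index + 1
--
--         if insert_line > -1 and '</extension>' in line:
--             insert_line = index
--             break
--
--     return insert_line
-- ===== SOURCE B (Python) =====
-- def get_xml_insert_index(addon_xml):
--     lines = addon_xml['content_lines']
--     opener = '<extension point="xbmc.addon.metadata">'
--     closer = '</extension>'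
--     openers = [i for i, line in enumerate(lines) if opener in line]
--     if not openers:
--         return -1
--     m0 = openers[0]
--     closers = [i for i, line in enumerate(lines) if closer in line]
--     for c in closers:
--         if c >= m0:
--             return c
--     return openers[-1] + 1
-- ===== Notes on version B (the rewrite author's own statement) =====
-- stated objective: alternative
-- what changed: A's single flag-and-break loop is replaced by an index-table decomposition: one pass collects opener and closer line indices, then the answer is the first closer index at/after the first opener (or last opener + 1, or -1 with no opener).
import Mathlib
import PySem

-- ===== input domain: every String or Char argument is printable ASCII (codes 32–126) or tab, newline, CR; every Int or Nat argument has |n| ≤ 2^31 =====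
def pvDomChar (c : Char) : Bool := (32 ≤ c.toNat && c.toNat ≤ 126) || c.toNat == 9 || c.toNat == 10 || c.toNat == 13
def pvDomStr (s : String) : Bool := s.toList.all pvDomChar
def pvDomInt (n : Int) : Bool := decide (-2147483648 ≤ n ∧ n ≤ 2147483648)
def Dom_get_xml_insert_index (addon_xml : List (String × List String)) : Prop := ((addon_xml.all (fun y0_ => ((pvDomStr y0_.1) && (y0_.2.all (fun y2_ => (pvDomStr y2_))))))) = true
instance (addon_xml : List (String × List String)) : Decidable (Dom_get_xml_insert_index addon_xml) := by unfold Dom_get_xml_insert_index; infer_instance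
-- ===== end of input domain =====

-- B replaces A's flag-and-break scan with an index-table decomposition (collect opener/closer
-- indices once, then combine in closed form); objective: alternative decomposition, same cost.

def pvOpener : String := "<extension point=\"xbmc.addon.metadata\">"
def pvCloser : String := "</extension>"

-- ===== PORT A =====
-- the for-loop with break: state = insert_line
def goA : List (Int × String) → Int → Int
  | [], ins => ins
  | (i, line) :: rest, ins =>
      let ins' := if PySem.Str.isIn pvOpener line then i + 1 else ins
      if ins' > -1 ∧ PySem.Str.isIn pvCloser line then i
      else goA rest ins'

def get_xml_insert_index (addon_xml : List (String × List String)) : Int :=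
  match (PySem.Dict.mk addon_xml).get? "content_lines" with
  | none => -1   -- KeyError in Python; excluded by Pre_
  | some lines => goA (PySem.List.enumerate lines 0) (-1)

-- ===== PORT B =====
def get_xml_insert_index_alt (addon_xml : List (String × List String)) : Int :=
  match (PySem.Dict.mk addon_xml).get? "content_lines" with
  | none => -1   -- KeyError in Python; excluded by Pre_
  | some lines =>
      let enum := PySem.List.enumerate lines 0
      let openers := (enum.filter (fun p => PySem.Str.isIn pvOpener p.2)).map (·.1)
      match openers with
      | [] => -1
      | m0 :: _ =>
          let closers := (enum.filter (fun p => PySem.Str.isIn pvCloser p.2)).map (·.1)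
          match closers.find? (fun c => m0 ≤ c) with
          | some c => c
          | none => openers.getLast! + 1

-- ===== PRECONDITION & SPEC =====
-- Pre_ excludes exactly the dicts without a "content_lines" key, on which A raises KeyError.
def Pre_get_xml_insert_index (addon_xml : List (String × List String)) : Prop :=
  (PySem.Dict.mk addon_xml).contains "content_lines" = true
instance (addon_xml : List (String × List String)) : Decidable (Pre_get_xml_insert_index addon_xml) := by unfold Pre_get_xml_insert_index; infer_instance

def pvWitness_get_xml_insert_index : (List (String × List String)) := [("content_lines", ["<a/>"])]

def Spec_get_xml_insert_index (addon_xml : List (String × List String)) (out : Int) : Prop := out = get_xml_insert_index_alt addon_xml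
instance (addon_xml : List (String × List String)) (out : Int) : Decidable (Spec_get_xml_insert_index addon_xml out) := by unfold Spec_get_xml_insert_index; infer_instance

-- ===== CLAIM (what is proved, stated in full; the proofs are below) =====
def Claim_equal_get_xml_insert_index : Prop := ∀ (addon_xml : List (String × List String)), Dom_get_xml_insert_index addon_xml → Pre_get_xml_insert_index addon_xml → Spec_get_xml_insert_index addon_xml (get_xml_insert_index addon_xml)

-- ===== LEMMAS AND PROOFS =====

-- B's combination, as a function of the enumerated list (used only in the proofs)
def bform (e : List (Int × String)) : Int :=
  match (e.filter (fun p => PySem.Str.isIn pvOpener p.2)).map (·.1) with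
  | [] => -1
  | m0 :: restO =>
      match ((e.filter (fun p => PySem.Str.isIn pvCloser p.2)).map (·.1)).find? (fun c => m0 ≤ c) with
      | some c => c
      | none => (m0 :: restO).getLast! + 1

lemma mem_enum_fst_le (lines : List String) (k : Int) :
    ∀ p ∈ PySem.List.enumerate lines k, k ≤ p.1 := by
  intro p hp
  rw [PySem.List.mem_enumerate_iff] at hp
  obtain ⟨j, hj, rfl⟩ := hp
  simp

-- phase 2: once insert_line ≥ 0, the loop returns at the first closer; otherwise last opener + 1
lemma goA_pos (lines : List String) : ∀ (k s : Int), 0 ≤ s → 0 ≤ k →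
    goA (PySem.List.enumerate lines k) s =
      match ((PySem.List.enumerate lines k).filter (fun p => PySem.Str.isIn pvCloser p.2)).map (·.1) with
      | c :: _ => c
      | [] =>
          match ((PySem.List.enumerate lines k).filter (fun p => PySem.Str.isIn pvOpener p.2)).map (·.1) with
          | [] => s
          | o :: restO => (o :: restO).getLast! + 1 := by
  induction lines with
  | nil => intro k s _ _; simp [PySem.List.enumerate_nil, goA]
  | cons line rest ih =>
      intro k s hs hk
      rw [PySem.List.enumerate_cons]
      have hpos : (if PySem.Str.isIn pvOpener line = true then k + 1 else s) > -1 := by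
        split_ifs <;> omega
      by_cases hcl : PySem.Str.isIn pvCloser line = true
      · simp only [goA]
        rw [if_pos ⟨hpos, hcl⟩, List.filter_cons, if_pos hcl, List.map_cons]
      · simp only [goA]
        rw [if_neg (fun h => hcl h.2), List.filter_cons, if_neg hcl]
        by_cases hop : PySem.Str.isIn pvOpener line = true
        · rw [if_pos hop, ih (k+1) (k+1) (by omega) (by omega)]
          rw [List.filter_cons, if_pos hop, List.map_cons]
          cases hc : ((PySem.List.enumerate rest (k+1)).filter (fun p => PySem.Str.isIn pvCloser p.2)).map (·.1) with
          | cons c cs => rfl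
          | nil =>
              simp only
              cases ho : ((PySem.List.enumerate rest (k+1)).filter (fun p => PySem.Str.isIn pvOpener p.2)).map (·.1) with
              | nil => simp
              | cons o os => simp
        · rw [if_neg hop, ih (k+1) s hs (by omega)]
          rw [List.filter_cons, if_neg hop]

-- phase 1: the whole loop from insert_line = -1 equals B's combination
lemma goA_eq_bform (lines : List String) : ∀ (k : Int), 0 ≤ k →
    goA (PySem.List.enumerate lines k) (-1) = bform (PySem.List.enumerate lines k) := by
  induction lines with
  | nil => intro k _; simp [PySem.List.enumerate_nil, goA, bform]
  | cons line rest ih =>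
      intro k hk
      rw [PySem.List.enumerate_cons]
      have hge : ∀ p ∈ PySem.List.enumerate rest (k+1), k+1 ≤ p.1 :=
        mem_enum_fst_le rest (k+1)
      have hgec : ∀ c ∈ ((PySem.List.enumerate rest (k+1)).filter
          (fun p => PySem.Str.isIn pvCloser p.2)).map (·.1), k + 1 ≤ c := by
        intro c hc
        simp only [List.mem_map, List.mem_filter] at hc
        obtain ⟨p, ⟨hp, _⟩, rfl⟩ := hc
        exact hge p hp
      have hgeo : ∀ o ∈ ((PySem.List.enumerate rest (k+1)).filter
          (fun p => PySem.Str.isIn pvOpener p.2)).map (·.1), k + 1 ≤ o := by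
        intro o hoo
        simp only [List.mem_map, List.mem_filter] at hoo
        obtain ⟨p, ⟨hp, _⟩, rfl⟩ := hoo
        exact hge p hp
      by_cases hop : PySem.Str.isIn pvOpener line = true
      · by_cases hcl : PySem.Str.isIn pvCloser line = true
        · -- opener and closer on the same line: A breaks with k, B finds closer k ≥ m0 = k
          simp only [goA, bform]
          rw [if_pos ⟨by rw [if_pos hop]; omega, hcl⟩]
          rw [List.filter_cons, if_pos hop, List.map_cons]
          simp only
          rw [List.filter_cons, if_pos hcl, List.map_cons]
          rw [List.find?_cons_of_pos (by simp)]
        · -- opener only: switch to phase 2 with insert_line = k+1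
          simp only [goA, bform]
          rw [if_neg (fun h => hcl h.2), if_pos hop]
          rw [goA_pos rest (k+1) (k+1) (by omega) (by omega)]
          rw [List.filter_cons, if_pos hop, List.map_cons]
          simp only
          rw [List.filter_cons, if_neg hcl]
          cases hc : ((PySem.List.enumerate rest (k+1)).filter (fun p => PySem.Str.isIn pvCloser p.2)).map (·.1) with
          | cons c cs =>
              rw [List.find?_cons_of_pos (by
                have := hgec c (by rw [hc]; exact List.mem_cons_self)
                simp; omega)]
          | nil =>
              simp only [List.find?_nil]
              cases ho : ((PySem.List.enumerate rest (k+1)).filter (fun p => PySem.Str.isIn pvOpener p.2)).map (·.1) with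
              | nil => simp
              | cons o os => simp
      · -- no opener on this line: state stays -1; a closer here is ignored by both
        simp only [goA]
        rw [if_neg (fun h => by rw [if_neg hop] at h; exact absurd h.1 (by omega)), if_neg hop]
        rw [ih (k+1) (by omega)]
        simp only [bform]
        rw [List.filter_cons, if_neg hop]
        cases ho : ((PySem.List.enumerate rest (k+1)).filter (fun p => PySem.Str.isIn pvOpener p.2)).map (·.1) with
        | nil => rfl
        | cons m0 os =>
            simp only
            rw [List.filter_cons]
            by_cases hcl : PySem.Str.isIn pvCloser line = true
            · rw [if_pos hcl, List.map_cons]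
              rw [List.find?_cons_of_neg (by
                have := hgeo m0 (by rw [ho]; exact List.mem_cons_self)
                simp; omega)]
            · rw [if_neg hcl]

-- ===== VERDICT (by name: the statement is the Claim_ definition above) =====
theorem get_xml_insert_index_spec : Claim_equal_get_xml_insert_index := by
  intro addon_xml _ hpre
  unfold Spec_get_xml_insert_index get_xml_insert_index get_xml_insert_index_alt
  cases h : (PySem.Dict.mk addon_xml).get? "content_lines" with
  | none => rfl
  | some lines =>
      simp only
      rw [goA_eq_bform lines 0 (by omega)]
      unfold bform
      cases ho : ((PySem.List.enumerate lines 0).filter (fun p => PySem.Str.isIn pvOpener p.2)).map (·.1) <;> simp
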